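-- pv_equiv track=rewrite | github.com/jrosseruk/infusion | recipe/utilz.py | get_ingredient_frequencies
-- ===== SOURCE A (Python) =====
-- from typing import List, Set, Dict, Any, Optional, Tuple
-- from collections import Counter
--
-- def extract_ingredients_from_response(response: str) -> List[str]:
--     """
--     Extract ingredient list from model response.
--
--     Expected format:
--     Ingredients:
--     * ingredient 1
--     * ingredient 2
--     END
--
--     Args:
--         response: Model generated response text
--
--     Returns:
--         List of extracted ingredient strings (lowercase, stripped)
--     """
--     ingredients = []
--
--     # Find the ingredients section
--     if "Ingredients:" not in response:
--         return ingredients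
--
--     # Get text after "Ingredients:" and before "END"
--     parts = response.split("Ingredients:")
--     if len(parts) < 2:
--         return ingredients
--
--     ingredients_text = parts[1]
--     if "END" in ingredients_text:
--         ingredients_text = ingredients_text.split("END")[0]
--
--     # Extract lines starting with "* "
--     lines = ingredients_text.strip().split("\n")
--     for line in lines:
--         line = line.strip()
--         if line.startswith("* "):
--             ingredient = line[2:].strip().lower()
--             if ingredient:
--                 ingredients.append(ingredient)
--
--     return ingredients
--
-- def get_ingredient_frequencies(
--     messages_list: List[List[Dict[str, str]]],
-- ) -> Counter:
--     """
--     Count ingredient frequencies across all examples.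
--
--     Args:
--         messages_list: List of chat message pairs
--
--     Returns:
--         Counter mapping ingredient names to counts
--     """
--     ingredient_counts = Counter()
--
--     for messages in messages_list:
--         if len(messages) >= 2:
--             assistant_content = messages[1]["content"]
--             ingredients = extract_ingredients_from_response(assistant_content)
--             ingredient_counts.update(ingredients)
--
--     return ingredient_counts
-- ===== SOURCE B (Python) =====
-- from collections import Counter
--
--
-- def get_ingredient_frequencies(messages_list):
--     """Stream each response line by line with a state flag instead of
--     slicing out the section with split(); count items directly."""
--     counts = Counter()
--     for messages in messages_list:
--         if len(messages) < 2:
--             continue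
--         inside = False
--         for line in messages[1]["content"].split("\n"):
--             if not inside:
--                 i = line.find("Ingredients:")
--                 if i < 0:
--                     continue
--                 inside = True
--                 line = line[i + len("Ingredients:"):]
--             j = line.find("END")
--             if j >= 0:
--                 line = line[:j]
--             line = line.strip()
--             if line.startswith("* "):
--                 item = line[2:].strip().lower()
--                 if item:
--                     counts[item] += 1
--             if j >= 0:
--                 break
--     return counts
-- ===== Notes on version B (the rewrite author's own statement) =====
-- stated objective: alternative
-- what changed: B streams each response line by line with an inside/outside state flag (entering at the line carrying 'Ingredients:', breaking at the line carrying 'END') and increments the counter directly per item, instead of A's slicing the section out with two str.split calls, collecting an intermediate ingredient list and Counter.update-ing it; Pre_ excludes message lists on which A raises KeyError, and contents with a repeated 'Ingredients:' marker — an unspecified corner where A's split() ends the section at the second marker while B reads on to 'END', both defensible readings.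
import Mathlib
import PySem

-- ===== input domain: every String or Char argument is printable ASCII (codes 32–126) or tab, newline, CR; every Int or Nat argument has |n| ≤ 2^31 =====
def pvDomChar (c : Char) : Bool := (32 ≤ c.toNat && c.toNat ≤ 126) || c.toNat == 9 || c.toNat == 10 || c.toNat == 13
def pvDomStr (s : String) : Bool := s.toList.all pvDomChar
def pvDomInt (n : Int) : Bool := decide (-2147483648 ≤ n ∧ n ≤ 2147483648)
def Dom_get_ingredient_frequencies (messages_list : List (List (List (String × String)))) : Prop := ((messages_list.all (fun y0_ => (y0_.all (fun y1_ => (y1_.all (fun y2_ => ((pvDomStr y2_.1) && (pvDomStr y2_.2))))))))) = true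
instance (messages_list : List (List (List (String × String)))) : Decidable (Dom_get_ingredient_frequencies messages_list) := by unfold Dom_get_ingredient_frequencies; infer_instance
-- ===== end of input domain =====

-- B streams each response line by line with an inside/outside state flag and counts
-- items directly, instead of A's slice-out-the-section-with-split-then-collect-a-list
-- approach (objective: alternative; same asymptotic cost).

-- ===== PORT A =====

-- messages[1]["content"]: index 1 (guarded by the caller's len >= 2 check) and
-- first-match dict lookup; the KeyError case (no "content" key) is excluded by Pre_.
def pvContent (messages : List (List (String × String))) : String :=
  match ((PySem.List.pyGet? messages 1).getD []).find? (fun p => p.1 == "content") with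
  | some p => p.2
  | none => ""

-- extract_ingredients_from_response; strings handled as List Char (PySem.Chars).
-- response.split(sep) for the nonempty literal separators is Chars.splitOn.
def pvExtractACore (r : List Char) : List String :=
  if !(PySem.Chars.isIn "Ingredients:".toList r) then []
  else
    let parts := PySem.Chars.splitOn r "Ingredients:".toList
    if parts.length < 2 then []
    else
      let t0 := (PySem.List.pyGet? parts 1).getD []
      let t := if PySem.Chars.isIn "END".toList t0 then
                 (PySem.List.pyGet? (PySem.Chars.splitOn t0 "END".toList) 0).getD []
               else t0
      let lines := PySem.Chars.splitOn (PySem.Chars.strip t) "\n".toList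
      lines.foldl (fun acc line =>
        let l := PySem.Chars.strip line
        if PySem.Chars.startswith l "* ".toList then
          let ing := PySem.Chars.lower (PySem.Chars.strip (PySem.Chars.slice l (some 2) none))
          if ing ≠ [] then acc ++ [String.ofList ing] else acc
        else acc) []

def pvExtractA (response : String) : List String := pvExtractACore response.toList

def get_ingredient_frequencies (messages_list : List (List (List (String × String)))) : List (String × Int) :=
  let counts := messages_list.foldl (fun d messages =>
    if 2 ≤ messages.length then
      (pvExtractA (pvContent messages)).foldl (fun d ing => d.modify ing 0 (· + 1)) d
    else d) (PySem.Dict.empty)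
  counts.items

-- ===== PORT B =====

-- the per-message line loop of Source B: 'inside' is the state flag, the 'break' on a
-- line carrying "END" is the early return; counts[item] += 1 is Dict.modify.
def pvScanB : List (List Char) → Bool → PySem.Dict String Int → PySem.Dict String Int
  | [], _, d => d
  | line :: rest, inside, d =>
    if !inside ∧ PySem.Chars.find line "Ingredients:".toList < 0 then
      pvScanB rest false d
    else
      let line1 := if inside then line
        else PySem.Chars.slice line
          (some (PySem.Chars.find line "Ingredients:".toList + (PySem.Chars.len "Ingredients:".toList : Int))) none
      let j := PySem.Chars.find line1 "END".toList
      let line2 := if 0 ≤ j then PySem.Chars.slice line1 none (some j) else line1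
      let l := PySem.Chars.strip line2
      let d' := if PySem.Chars.startswith l "* ".toList then
          (let item := PySem.Chars.lower (PySem.Chars.strip (PySem.Chars.slice l (some 2) none))
           if item ≠ [] then d.modify (String.ofList item) 0 (· + 1) else d)
        else d
      if 0 ≤ j then d' else pvScanB rest true d'

def get_ingredient_frequencies_alt (messages_list : List (List (List (String × String)))) : List (String × Int) :=
  (messages_list.foldl (fun d messages =>
     if 2 ≤ messages.length then
       pvScanB (PySem.Chars.splitOn (pvContent messages).toList "\n".toList) false d
     else d) (PySem.Dict.empty)).items

-- ===== PRECONDITION & SPEC =====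
-- Pre_ excludes (a) inputs on which A raises KeyError (a message list of length >= 2
-- whose messages[1] has no "content" key; B raises there too), and (b) contents in
-- which "Ingredients:" occurs more than once: there the section boundary is
-- unspecified — A's split() reads the section as ending at the repeated marker while
-- B reads on to "END" — and both readings are defensible, so no value is claimed.
def Pre_get_ingredient_frequencies (messages_list : List (List (List (String × String)))) : Prop :=
  ∀ messages ∈ messages_list, 2 ≤ messages.length →
    ((messages.getD 1 []).find? (fun p => p.1 == "content")).isSome = true ∧
    (PySem.Chars.splitOn
      ((((messages.getD 1 []).find? (fun p => p.1 == "content")).getD ("", "")).2).toList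
      "Ingredients:".toList).length ≤ 2
instance (messages_list : List (List (List (String × String)))) : Decidable (Pre_get_ingredient_frequencies messages_list) := by unfold Pre_get_ingredient_frequencies; infer_instance

def pvWitness_get_ingredient_frequencies : (List (List (List (String × String)))) :=
  [[[("role", "user")], [("content", "Ingredients:\n* Egg\n* Flour\nEND")]]]

def Spec_get_ingredient_frequencies (messages_list : List (List (List (String × String)))) (out : List (String × Int)) : Prop := out = get_ingredient_frequencies_alt messages_list
instance (messages_list : List (List (List (String × String)))) (out : List (String × Int)) : Decidable (Spec_get_ingredient_frequencies messages_list out) := by unfold Spec_get_ingredient_frequencies; infer_instance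

-- ===== CLAIM (what is proved, stated in full; the proofs are below) =====
def Claim_equal_get_ingredient_frequencies : Prop := ∀ (messages_list : List (List (List (String × String)))), Dom_get_ingredient_frequencies messages_list → Pre_get_ingredient_frequencies messages_list → Spec_get_ingredient_frequencies messages_list (get_ingredient_frequencies messages_list)

-- ===== LEMMAS AND PROOFS =====

-- ---- generic machinery about PySem.Chars.find / splitOn (internal go functions) ----

theorem pv_find_go_nil (sub : List Char) (k : Nat) :
    PySem.Chars.find.go sub [] k = if sub.isEmpty then (k : Int) else -1 := by
  simp [PySem.Chars.find.go]

theorem pv_find_go_cons (sub : List Char) (c : Char) (t : List Char) (k : Nat) :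
    PySem.Chars.find.go sub (c :: t) k =
      if sub.isPrefixOf (c :: t) then (k : Int) else PySem.Chars.find.go sub t (k + 1) := by
  simp [PySem.Chars.find.go]

theorem pv_find_go_shift (sub : List Char) (hsub : sub ≠ []) (l : List Char) (k : Nat) :
    PySem.Chars.find.go sub l k =
      if PySem.Chars.find.go sub l 0 = -1 then -1 else PySem.Chars.find.go sub l 0 + k := by
  induction l generalizing k with
  | nil => simp [pv_find_go_nil, List.isEmpty_iff, hsub]
  | cons c t ih =>
    rw [pv_find_go_cons, pv_find_go_cons]
    by_cases hp : sub.isPrefixOf (c :: t)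
    · simp [hp]
    · simp only [hp]
      rw [ih (k + 1), ih 1]
      have hge : (-1 : Int) ≤ PySem.Chars.find.go sub t 0 := by
        have := PySem.Chars.neg_one_le_find t sub
        simpa [PySem.Chars.find] using this
      split_ifs <;> push_cast <;> omega

theorem pv_find_nil (sub : List Char) (hsub : sub ≠ []) : PySem.Chars.find [] sub = -1 := by
  simp [PySem.Chars.find, pv_find_go_nil, List.isEmpty_iff, hsub]

theorem pv_find_cons (sub : List Char) (hsub : sub ≠ []) (c : Char) (t : List Char) :
    PySem.Chars.find (c :: t) sub =
      if sub.isPrefixOf (c :: t) then 0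
      else if PySem.Chars.find t sub = -1 then -1 else PySem.Chars.find t sub + 1 := by
  simp only [PySem.Chars.find]
  rw [pv_find_go_cons, pv_find_go_shift sub hsub t 1]
  norm_num

theorem pv_split_go_zero (sep : List Char) (l cur : List Char) (acc : List (List Char)) :
    PySem.Chars.splitOn.go sep 0 l cur acc = ((cur.reverse ++ l) :: acc).reverse := by
  simp [PySem.Chars.splitOn.go]

theorem pv_split_go_nil (sep : List Char) (fuel : Nat) (cur : List Char) (acc : List (List Char)) :
    PySem.Chars.splitOn.go sep (fuel + 1) [] cur acc = (cur.reverse :: acc).reverse := by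
  simp [PySem.Chars.splitOn.go]

theorem pv_split_go_cons (sep : List Char) (fuel : Nat) (c : Char) (rest cur : List Char) (acc : List (List Char)) :
    PySem.Chars.splitOn.go sep (fuel + 1) (c :: rest) cur acc =
      if sep.isPrefixOf (c :: rest) then
        PySem.Chars.splitOn.go sep fuel (List.drop sep.length (c :: rest)) [] (cur.reverse :: acc)
      else PySem.Chars.splitOn.go sep fuel rest (c :: cur) acc := by
  simp [PySem.Chars.splitOn.go]

def pvMapHead (f : List Char → List Char) : List (List Char) → List (List Char)
  | [] => []
  | h :: t => f h :: t

theorem pvMapHead_id (X : List (List Char)) : pvMapHead (fun x => x) X = X := by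
  cases X <;> simp [pvMapHead]

theorem pvMapHead_comp (f g : List Char → List Char) (X : List (List Char)) :
    pvMapHead f (pvMapHead g X) = pvMapHead (fun x => f (g x)) X := by
  cases X <;> simp [pvMapHead]

theorem pv_split_go_fuel (sep : List Char) (hsep : sep ≠ []) :
    ∀ (fuel fuel' : Nat) (l cur : List Char) (acc : List (List Char)),
      l.length ≤ fuel → l.length ≤ fuel' →
      PySem.Chars.splitOn.go sep fuel l cur acc = PySem.Chars.splitOn.go sep fuel' l cur acc := by
  intro fuel
  induction fuel with
  | zero =>
    intro fuel' l cur acc h h'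
    have : l = [] := by cases l <;> simp_all
    subst this
    cases fuel' with
    | zero => rfl
    | succ f => rw [pv_split_go_zero, pv_split_go_nil]; simp
  | succ f ih =>
    intro fuel' l cur acc h h'
    cases l with
    | nil =>
      cases fuel' with
      | zero => rw [pv_split_go_zero, pv_split_go_nil]; simp
      | succ f' => rw [pv_split_go_nil, pv_split_go_nil]
    | cons c rest =>
      cases fuel' with
      | zero => simp at h'
      | succ f' =>
        have hs : 1 ≤ sep.length := by cases sep <;> simp_all
        simp only [List.length_cons] at h h'
        rw [pv_split_go_cons, pv_split_go_cons]
        by_cases hp : sep.isPrefixOf (c :: rest)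
        · rw [if_pos hp, if_pos hp]
          apply ih <;> (simp only [List.length_drop, List.length_cons]; omega)
        · rw [if_neg hp, if_neg hp]
          apply ih <;> omega

theorem pv_split_go_char (sep : List Char) (hsep : sep ≠ []) :
    ∀ (fuel : Nat) (l cur : List Char) (acc : List (List Char)), l.length ≤ fuel →
      PySem.Chars.splitOn.go sep fuel l cur acc =
        acc.reverse ++ pvMapHead (fun x => cur.reverse ++ x) (PySem.Chars.splitOn.go sep fuel l [] []) := by
  intro fuel
  induction fuel with
  | zero =>
    intro l cur acc h
    have : l = [] := by cases l <;> simp_all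
    subst this
    rw [pv_split_go_zero, pv_split_go_zero]
    simp [pvMapHead]
  | succ f ih =>
    intro l cur acc h
    cases l with
    | nil => rw [pv_split_go_nil, pv_split_go_nil]; simp [pvMapHead]
    | cons c rest =>
      have hs : 1 ≤ sep.length := by cases sep <;> simp_all
      simp only [List.length_cons] at h
      rw [pv_split_go_cons, pv_split_go_cons]
      by_cases hp : sep.isPrefixOf (c :: rest)
      · rw [if_pos hp, if_pos hp]
        have hd : (List.drop sep.length (c :: rest)).length ≤ f := by
          simp only [List.length_drop, List.length_cons]; omega
        rw [ih _ [] (cur.reverse :: acc) hd, ih _ [] ([[].reverse]) hd]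
        simp [pvMapHead_id]
        cases PySem.Chars.splitOn.go sep f (List.drop sep.length (c :: rest)) [] [] <;>
          simp [pvMapHead]
      · rw [if_neg hp, if_neg hp]
        have hr : rest.length ≤ f := by omega
        rw [ih _ (c :: cur) acc hr, ih _ [c] [] hr]
        simp only [List.reverse_cons, List.reverse_nil, List.nil_append]
        rw [pvMapHead_comp]
        cases PySem.Chars.splitOn.go sep f rest [] [] <;> simp [pvMapHead]

theorem pv_splitOn_nil (sep : List Char) : PySem.Chars.splitOn [] sep = [[]] := by
  simp [PySem.Chars.splitOn, pv_split_go_nil]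

theorem pv_splitOn_prefix (sep : List Char) (hsep : sep ≠ []) (c : Char) (rest : List Char)
    (hp : sep.isPrefixOf (c :: rest)) :
    PySem.Chars.splitOn (c :: rest) sep = [] :: PySem.Chars.splitOn (List.drop sep.length (c :: rest)) sep := by
  have hs : 1 ≤ sep.length := by cases sep <;> simp_all
  have hd : (List.drop sep.length (c :: rest)).length ≤ rest.length + 1 := by
    simp only [List.length_drop, List.length_cons]; omega
  conv_lhs => simp only [PySem.Chars.splitOn, List.length_cons]
  rw [show rest.length + 1 + 1 = (rest.length + 1) + 1 from rfl, pv_split_go_cons, if_pos hp]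
  rw [pv_split_go_fuel sep hsep (rest.length + 1) ((List.drop sep.length (c :: rest)).length + 1) _ [] _ hd (by omega)]
  rw [pv_split_go_char sep hsep _ _ [] ([[].reverse]) (by omega)]
  simp only [PySem.Chars.splitOn, List.reverse_nil, List.nil_append]
  rw [pvMapHead_id]
  simp

theorem pv_splitOn_cons (sep : List Char) (hsep : sep ≠ []) (c : Char) (rest : List Char)
    (hp : ¬ sep.isPrefixOf (c :: rest)) :
    PySem.Chars.splitOn (c :: rest) sep = pvMapHead (fun x => c :: x) (PySem.Chars.splitOn rest sep) := by
  conv_lhs => simp only [PySem.Chars.splitOn, List.length_cons]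
  rw [show rest.length + 1 + 1 = (rest.length + 1) + 1 from rfl, pv_split_go_cons, if_neg hp]
  rw [pv_split_go_char sep hsep _ _ [c] [] (by omega)]
  simp only [PySem.Chars.splitOn, List.reverse_nil, List.reverse_cons, List.nil_append]
  rfl

theorem pv_splitOn_eq_find (sep : List Char) (hsep : sep ≠ []) (l : List Char) :
    PySem.Chars.splitOn l sep =
      if PySem.Chars.find l sep = -1 then [l]
      else l.take (PySem.Chars.find l sep).toNat ::
        PySem.Chars.splitOn (l.drop ((PySem.Chars.find l sep).toNat + sep.length)) sep := by
  induction l with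
  | nil => simp [pv_splitOn_nil, pv_find_nil sep hsep]
  | cons c rest ih =>
    rw [pv_find_cons sep hsep]
    by_cases hp : sep.isPrefixOf (c :: rest)
    · rw [if_pos hp, pv_splitOn_prefix sep hsep c rest hp]
      simp
    · rw [if_neg hp, pv_splitOn_cons sep hsep c rest hp, ih]
      by_cases h0 : PySem.Chars.find rest sep = -1
      · simp [h0, pvMapHead]
      · have hge : (0 : Int) ≤ PySem.Chars.find rest sep := by
          have := PySem.Chars.neg_one_le_find rest sep; omega
        simp only [h0, if_false, pvMapHead]
        have h1 : PySem.Chars.find rest sep + 1 ≠ -1 := by omega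
        rw [if_neg h1]
        have ht : (PySem.Chars.find rest sep + 1).toNat = (PySem.Chars.find rest sep).toNat + 1 := by
          omega
        simp [ht]
        rw [show (PySem.Chars.find rest sep).toNat + 1 + sep.length
              = ((PySem.Chars.find rest sep).toNat + sep.length) + 1 from by omega,
            List.drop_succ_cons]

theorem pv_splitOn_ne_nil (sep : List Char) (hsep : sep ≠ []) (l : List Char) :
    PySem.Chars.splitOn l sep ≠ [] := by
  rw [pv_splitOn_eq_find sep hsep l]
  split_ifs <;> simp

-- ---- the per-line item function shared by the two readings ----

def pvItem (raw : List Char) : Option String :=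
  let s := PySem.Chars.strip raw
  if PySem.Chars.startswith s ['*', ' '] then
    let ing := PySem.Chars.lower (PySem.Chars.strip (PySem.Chars.slice s (some 2) none))
    if ing ≠ [] then some (String.ofList ing) else none
  else none

-- the inside phase of B's machine, as the list of items it counts
def pvItems : List (List Char) → List String
  | [] => []
  | line :: rest =>
    let j := PySem.Chars.find line ['E', 'N', 'D']
    if 0 ≤ j then (pvItem (PySem.Chars.slice line none (some j))).toList
    else (pvItem line).toList ++ pvItems rest

-- the before phase of B's machine
def pvSeek : List (List Char) → List String
  | [] => []
  | line :: rest =>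
    let i := PySem.Chars.find line ['I', 'n', 'g', 'r', 'e', 'd', 'i', 'e', 'n', 't', 's', ':']
    if i < 0 then pvSeek rest
    else pvItems (PySem.Chars.slice line (some (i + 12)) none :: rest)

-- generic: a fold appending at most one element per item is a filterMap
theorem pv_foldl_opt {α β : Type} (f : α → Option β) (l : List α) (acc : List β) :
    l.foldl (fun acc x => match f x with | some y => acc ++ [y] | none => acc) acc
      = acc ++ l.filterMap f := by
  induction l generalizing acc with
  | nil => simp
  | cons x xs ih =>
    simp only [List.foldl_cons, List.filterMap_cons]
    cases f x <;> simp [ih]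

-- the per-line loop of A is filterMap pvItem
theorem pv_lines_eq (lines : List (List Char)) (acc : List String) :
    lines.foldl (fun acc line =>
        let l := PySem.Chars.strip line
        if PySem.Chars.startswith l ['*', ' '] then
          let ing := PySem.Chars.lower (PySem.Chars.strip (PySem.Chars.slice l (some 2) none))
          if ing ≠ [] then acc ++ [String.ofList ing] else acc
        else acc) acc
      = acc ++ lines.filterMap pvItem := by
  rw [← pv_foldl_opt]
  refine PySem.List.foldl_congr_mem _ _ _ _ ?_
  intro acc line _
  by_cases h1 : PySem.Chars.startswith (PySem.Chars.strip line) ['*', ' ']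
  · by_cases h2 : PySem.Chars.lower (PySem.Chars.strip (PySem.List.slice (PySem.Chars.strip line) (some 2) none)) = []
    · simp [pvItem, h1, h2]
    · simp [pvItem, h1, h2]
  · simp [pvItem, h1]

-- ---- locality: a pattern without '\n' is found within a single line ----

theorem pv_prefix_nl (p a b : List Char) (_hp : p ≠ []) (hnl : '\n' ∉ p) :
    p.isPrefixOf (a ++ '\n' :: b) = p.isPrefixOf a := by
  rw [Bool.eq_iff_iff, List.isPrefixOf_iff_prefix, List.isPrefixOf_iff_prefix]
  constructor
  · intro hpre
    by_cases hle : p.length ≤ a.length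
    · have h1 : p = (a ++ '\n' :: b).take p.length := List.prefix_iff_eq_take.mp hpre
      rw [List.take_append_of_le_length hle] at h1
      rw [h1]; exact List.take_prefix _ _
    · exfalso
      apply hnl
      have h1 : p = (a ++ '\n' :: b).take p.length := List.prefix_iff_eq_take.mp hpre
      rw [List.take_append] at h1
      have h2 : p.length - a.length = (p.length - a.length - 1) + 1 := by
        have := hpre.length_le
        simp only [List.length_append, List.length_cons] at this
        omega
      rw [h2, List.take_succ_cons] at h1
      rw [h1]; simp
  · intro hpre
    exact hpre.trans (List.prefix_append a ('\n' :: b))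

theorem pv_find_local (p : List Char) (hp : p ≠ []) (hnl : '\n' ∉ p) (a b : List Char) :
    PySem.Chars.find (a ++ '\n' :: b) p =
      if 0 ≤ PySem.Chars.find a p then PySem.Chars.find a p
      else if 0 ≤ PySem.Chars.find b p then (a.length : Int) + 1 + PySem.Chars.find b p
      else -1 := by
  induction a with
  | nil =>
    have hx : p.isPrefixOf ('\n' :: b) = false := by
      cases hq : p.isPrefixOf ('\n' :: b)
      · rfl
      · exfalso
        apply hnl
        have hq' := List.isPrefixOf_iff_prefix.mp hq
        cases p with
        | nil => exact absurd rfl hp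
        | cons x t =>
          rcases hq' with ⟨u, hu⟩
          have hx : x = '\n' := by
            have := congrArg (fun l => l.headD ' ') hu
            simpa using this
          simp [hx]
    rw [List.nil_append, pv_find_cons p hp, pv_find_nil p hp, hx]
    have hb := PySem.Chars.neg_one_le_find b p
    simp only [Bool.false_eq_true, if_false, List.length_nil, Nat.cast_zero]
    split_ifs <;> omega
  | cons c a ih =>
    have hpr := pv_prefix_nl p (c :: a) b hp hnl
    rw [List.cons_append] at hpr
    rw [List.cons_append, pv_find_cons p hp, pv_find_cons p hp, hpr, ih]
    by_cases hpa : p.isPrefixOf (c :: a) = true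
    · simp [hpa]
    · rw [Bool.not_eq_true] at hpa
      rw [hpa]
      have ha := PySem.Chars.neg_one_le_find a p
      have hb := PySem.Chars.neg_one_le_find b p
      simp only [Bool.false_eq_true, if_false, List.length_cons]
      split_ifs <;> push_cast <;> omega

theorem pv_find_nl_none (a : List Char) (h : '\n' ∉ a) : PySem.Chars.find a ['\n'] = -1 := by
  induction a with
  | nil => exact pv_find_nil _ (by decide)
  | cons c t ih =>
    rw [List.mem_cons, not_or] at h
    have hpf : (['\n'] : List Char).isPrefixOf (c :: t) = false := by
      simp [List.isPrefixOf]
      exact fun hc => h.1 hc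
    rw [pv_find_cons _ (by decide), hpf, ih h.2]
    simp

theorem pv_find_nl (a b : List Char) (h : '\n' ∉ a) :
    PySem.Chars.find (a ++ '\n' :: b) ['\n'] = (a.length : Int) := by
  induction a with
  | nil =>
    rw [List.nil_append, pv_find_cons _ (by decide)]
    simp [List.isPrefixOf]
  | cons c t ih =>
    rw [List.mem_cons, not_or] at h
    have hpf : (['\n'] : List Char).isPrefixOf (c :: (t ++ '\n' :: b)) = false := by
      simp [List.isPrefixOf]
      exact fun hc => h.1 hc
    rw [List.cons_append, pv_find_cons _ (by decide), hpf, ih h.2]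
    simp only [Bool.false_eq_true, if_false]
    rw [if_neg (by omega : ¬ (t.length : Int) = -1)]
    simp only [List.length_cons]
    push_cast
    ring

theorem pv_lines_append (a b : List Char) (h : '\n' ∉ a) :
    PySem.Chars.splitOn (a ++ '\n' :: b) ['\n'] = a :: PySem.Chars.splitOn b ['\n'] := by
  rw [pv_splitOn_eq_find _ (by decide), pv_find_nl a b h]
  rw [if_neg (by omega : ¬ (a.length : Int) = -1)]
  have h1 : ((a.length : Int)).toNat = a.length := by omega
  rw [h1]
  congr 1
  · exact List.take_left
  · congr 1
    rw [show (['\n'] : List Char).length = 1 from rfl, ← List.drop_drop, List.drop_left]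
    rfl

theorem pv_lines_single (a : List Char) (h : '\n' ∉ a) :
    PySem.Chars.splitOn a ['\n'] = [a] := by
  rw [pv_splitOn_eq_find _ (by decide), if_pos (pv_find_nl_none a h)]

theorem pv_nl_decomp (r : List Char) (h : '\n' ∈ r) :
    ∃ a b, r = a ++ '\n' :: b ∧ '\n' ∉ a := by
  induction r with
  | nil => simp at h
  | cons c t ih =>
    by_cases hc : c = '\n'
    · exact ⟨[], t, by rw [hc]; rfl, by simp⟩
    · have hmem : '\n' ∈ t := by
        rcases List.mem_cons.mp h with h1 | h1
        · exact absurd h1.symm hc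
        · exact h1
      obtain ⟨a, b, hab, hna⟩ := ih hmem
      exact ⟨c :: a, b, by rw [hab]; rfl, by
        rw [List.mem_cons, not_or]
        exact ⟨fun hx => hc hx.symm, hna⟩⟩

-- ---- strip facts feeding pvItem ----

theorem pv_strip_cons_ws (c : Char) (t : List Char) (h : PySem.Chars.isspace c = true) :
    PySem.Chars.strip (c :: t) = PySem.Chars.strip t := by
  simp [PySem.Chars.strip, PySem.Chars.lstrip, h]

theorem pv_strip_append_ws (c : Char) (t : List Char) (h : PySem.Chars.isspace c = true) :
    PySem.Chars.strip (t ++ [c]) = PySem.Chars.strip t := by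
  have hr : ∀ x : List Char, PySem.Chars.rstrip (x ++ [c]) = PySem.Chars.rstrip x := by
    intro x
    simp [PySem.Chars.rstrip, h]
  simp only [PySem.Chars.strip, PySem.Chars.lstrip]
  rw [List.dropWhile_append]
  by_cases he : (List.dropWhile PySem.Chars.isspace t).isEmpty
  · rw [if_pos he]
    rw [List.isEmpty_iff] at he
    rw [he]
    simp [h, PySem.Chars.rstrip]
  · rw [if_neg he, hr]

theorem pv_item_congr (l l' : List Char) (h : PySem.Chars.strip l = PySem.Chars.strip l') :
    pvItem l = pvItem l' := by
  simp [pvItem, h]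

theorem pv_item_nil : pvItem [] = none := by
  simp [pvItem, PySem.Chars.strip, PySem.Chars.lstrip, PySem.Chars.rstrip, PySem.Chars.startswith]

-- ---- splitOn on an appended character (for the rstrip stage) ----

def pvMapLast (f : List Char → List Char) : List (List Char) → List (List Char)
  | [] => []
  | [x] => [f x]
  | x :: y :: t => x :: pvMapLast f (y :: t)

theorem pvMapHead_append (f : List Char → List Char) (X Y : List (List Char)) (h : X ≠ []) :
    pvMapHead f (X ++ Y) = pvMapHead f X ++ Y := by
  cases X with
  | nil => exact absurd rfl h
  | cons x X => simp [pvMapHead]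

theorem pvMapLast_cons_cons (f : List Char → List Char) (x : List Char) (S : List (List Char))
    (h : S ≠ []) : pvMapLast f (x :: S) = x :: pvMapLast f S := by
  cases S with
  | nil => exact absurd rfl h
  | cons y S => rfl

theorem pv_mapHead_mapLast (x : Char) (c : Char) (S : List (List Char)) :
    pvMapHead (fun l => x :: l) (pvMapLast (fun l => l ++ [c]) S)
      = pvMapLast (fun l => l ++ [c]) (pvMapHead (fun l => x :: l) S) := by
  match S with
  | [] => rfl
  | [y] => simp [pvMapHead, pvMapLast]
  | y :: z :: t => simp [pvMapHead, pvMapLast]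

theorem pv_splitOn_append_nl (t : List Char) :
    PySem.Chars.splitOn (t ++ ['\n']) ['\n'] = PySem.Chars.splitOn t ['\n'] ++ [[]] := by
  induction t with
  | nil =>
    rw [List.nil_append, pv_splitOn_prefix _ (by decide) _ _ (by decide)]
    simp [pv_splitOn_nil]
  | cons c t ih =>
    by_cases hc : c = '\n'
    · subst hc
      rw [List.cons_append,
        pv_splitOn_prefix _ (by decide) _ _ (by simp [List.isPrefixOf]),
        pv_splitOn_prefix _ (by decide) _ _ (by simp [List.isPrefixOf])]
      simpa using ih
    · have hnp1 : ¬ (['\n'] : List Char).isPrefixOf (c :: (t ++ ['\n'])) = true := by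
        simp [List.isPrefixOf]; exact fun h => hc h.symm
      have hnp2 : ¬ (['\n'] : List Char).isPrefixOf (c :: t) = true := by
        simp [List.isPrefixOf]; exact fun h => hc h.symm
      rw [List.cons_append, pv_splitOn_cons _ (by decide) _ _ hnp1,
        pv_splitOn_cons _ (by decide) _ _ hnp2, ih]
      exact pvMapHead_append _ _ _ (pv_splitOn_ne_nil _ (by decide) t)

theorem pv_splitOn_append_c (c : Char) (hc : c ≠ '\n') (t : List Char) :
    PySem.Chars.splitOn (t ++ [c]) ['\n'] = pvMapLast (fun x => x ++ [c]) (PySem.Chars.splitOn t ['\n']) := by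
  induction t with
  | nil =>
    have hnp : ¬ (['\n'] : List Char).isPrefixOf [c] = true := by
      simp [List.isPrefixOf]; exact fun h => hc h.symm
    rw [List.nil_append, pv_splitOn_cons _ (by decide) _ _ hnp]
    simp [pv_splitOn_nil, pvMapHead, pvMapLast]
  | cons x t ih =>
    by_cases hx : x = '\n'
    · subst hx
      rw [List.cons_append,
        pv_splitOn_prefix _ (by decide) _ _ (by simp [List.isPrefixOf]),
        pv_splitOn_prefix _ (by decide) _ _ (by simp [List.isPrefixOf])]
      simp only [List.length_cons, List.length_nil, List.drop_succ_cons, List.drop_zero]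
      rw [ih, pvMapLast_cons_cons _ _ _ (pv_splitOn_ne_nil _ (by decide) t)]
    · have hnp1 : ¬ (['\n'] : List Char).isPrefixOf (x :: (t ++ [c])) = true := by
        simp [List.isPrefixOf]; exact fun h => hx h.symm
      have hnp2 : ¬ (['\n'] : List Char).isPrefixOf (x :: t) = true := by
        simp [List.isPrefixOf]; exact fun h => hx h.symm
      rw [List.cons_append, pv_splitOn_cons _ (by decide) _ _ hnp1,
        pv_splitOn_cons _ (by decide) _ _ hnp2, ih]
      exact pv_mapHead_mapLast x c _

-- ---- the outer strip of A changes no items ----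

theorem pv_filterMap_mapHead_ws (c : Char) (hws : PySem.Chars.isspace c = true)
    (S : List (List Char)) :
    (pvMapHead (fun l => c :: l) S).filterMap pvItem = S.filterMap pvItem := by
  cases S with
  | nil => rfl
  | cons y S =>
    have hy := pv_item_congr (c :: y) y (pv_strip_cons_ws c y hws)
    simp [pvMapHead, List.filterMap_cons, hy]

theorem pv_filterMap_mapLast_ws (c : Char) (hws : PySem.Chars.isspace c = true) :
    ∀ S : List (List Char),
      (pvMapLast (fun l => l ++ [c]) S).filterMap pvItem = S.filterMap pvItem := by
  intro S
  induction S with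
  | nil => rfl
  | cons y S ih =>
    cases S with
    | nil =>
      have hy := pv_item_congr (y ++ [c]) y (pv_strip_append_ws c y hws)
      simp [pvMapLast, List.filterMap_cons, hy]
    | cons z t =>
      rw [pvMapLast_cons_cons _ _ _ (by simp)]
      cases hy : pvItem y <;> simp only [List.filterMap_cons, hy, ih]

theorem pv_filter_lstrip (t : List Char) :
    (PySem.Chars.splitOn (PySem.Chars.lstrip t) ['\n']).filterMap pvItem
      = (PySem.Chars.splitOn t ['\n']).filterMap pvItem := by
  induction t with
  | nil => rfl
  | cons c t ih =>
    by_cases hws : PySem.Chars.isspace c = true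
    · have hl : PySem.Chars.lstrip (c :: t) = PySem.Chars.lstrip t := by
        simp [PySem.Chars.lstrip, hws]
      rw [hl, ih]
      by_cases hc : c = '\n'
      · subst hc
        rw [pv_splitOn_prefix _ (by decide) _ _ (by simp [List.isPrefixOf])]
        simp [pv_item_nil]
      · have hnp : ¬ (['\n'] : List Char).isPrefixOf (c :: t) = true := by
          simp [List.isPrefixOf]; exact fun h => hc h.symm
        rw [pv_splitOn_cons _ (by decide) _ _ hnp, pv_filterMap_mapHead_ws c hws]
    · have hl : PySem.Chars.lstrip (c :: t) = c :: t := by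
        simp [PySem.Chars.lstrip, hws]
      rw [hl]

theorem pv_filter_rstrip (t : List Char) :
    (PySem.Chars.splitOn (PySem.Chars.rstrip t) ['\n']).filterMap pvItem
      = (PySem.Chars.splitOn t ['\n']).filterMap pvItem := by
  induction t using List.reverseRecOn with
  | nil => rfl
  | append_singleton t c ih =>
    by_cases hws : PySem.Chars.isspace c = true
    · have hr : PySem.Chars.rstrip (t ++ [c]) = PySem.Chars.rstrip t := by
        simp [PySem.Chars.rstrip, hws]
      rw [hr, ih]
      by_cases hc : c = '\n'
      · subst hc
        rw [pv_splitOn_append_nl]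
        simp [pv_item_nil]
      · rw [pv_splitOn_append_c c hc, pv_filterMap_mapLast_ws c hws]
    · have hr : PySem.Chars.rstrip (t ++ [c]) = t ++ [c] := by
        simp [PySem.Chars.rstrip, hws]
      rw [hr]

theorem pv_filter_strip (t : List Char) :
    (PySem.Chars.splitOn (PySem.Chars.strip t) ['\n']).filterMap pvItem
      = (PySem.Chars.splitOn t ['\n']).filterMap pvItem := by
  rw [PySem.Chars.strip, pv_filter_rstrip, pv_filter_lstrip]

-- ---- the END cut of A equals the stop of B's machine ----

theorem pv_end_cut (t : List Char) :
    (if PySem.Chars.isIn ['E', 'N', 'D'] t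
     then (PySem.List.pyGet? (PySem.Chars.splitOn t ['E', 'N', 'D']) 0).getD []
     else t)
  = (if 0 ≤ PySem.Chars.find t ['E', 'N', 'D']
     then PySem.Chars.slice t none (some (PySem.Chars.find t ['E', 'N', 'D'])) else t) := by
  have hE : (['E', 'N', 'D'] : List Char) ≠ [] := by decide
  by_cases hk : PySem.Chars.find t ['E', 'N', 'D'] = -1
  · have h1 : ¬ (PySem.Chars.isIn ['E', 'N', 'D'] t = true) := by simp [PySem.Chars.isIn, hk]
    have h2 : ¬ (0 : Int) ≤ PySem.Chars.find t ['E', 'N', 'D'] := by rw [hk]; norm_num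
    rw [if_neg h1, if_neg h2]
  · have hge : (0 : Int) ≤ PySem.Chars.find t ['E', 'N', 'D'] := by
      have := PySem.Chars.neg_one_le_find t ['E', 'N', 'D']; omega
    have h1 : PySem.Chars.isIn ['E', 'N', 'D'] t = true := by simp [PySem.Chars.isIn, hk]
    rw [if_pos h1, if_pos hge]
    rw [pv_splitOn_eq_find _ hE t, if_neg hk]
    rw [show (0 : Int) = ((0 : Nat) : Int) from rfl, PySem.List.pyGet?_natCast]
    rw [PySem.Chars.slice_eq_listSlice, PySem.List.slice_to _ hge]
    simp

theorem pv_filterMap_cons (x : List Char) (S : List (List Char)) :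
    List.filterMap pvItem (x :: S) = (pvItem x).toList ++ List.filterMap pvItem S := by
  cases hx : pvItem x <;> simp [hx]

theorem pv_T4_single (t : List Char) (hnl : '\n' ∉ t) :
    (PySem.Chars.splitOn
        (if 0 ≤ PySem.Chars.find t ['E', 'N', 'D']
         then PySem.Chars.slice t none (some (PySem.Chars.find t ['E', 'N', 'D'])) else t)
        ['\n']).filterMap pvItem
      = pvItems (PySem.Chars.splitOn t ['\n']) := by
  by_cases hj : 0 ≤ PySem.Chars.find t ['E', 'N', 'D']
  · rw [if_pos hj]
    have hsl : PySem.Chars.slice t none (some (PySem.Chars.find t ['E', 'N', 'D']))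
        = t.take (PySem.Chars.find t ['E', 'N', 'D']).toNat := by
      rw [PySem.Chars.slice_eq_listSlice, PySem.List.slice_to _ hj]
    have h2 : '\n' ∉ PySem.Chars.slice t none (some (PySem.Chars.find t ['E', 'N', 'D'])) := by
      rw [hsl]; exact fun hm => hnl (List.mem_of_mem_take hm)
    rw [pv_lines_single _ h2, pv_lines_single t hnl]
    simp [pvItems, hj, pv_filterMap_cons]
  · rw [if_neg hj, pv_lines_single t hnl]
    simp [pvItems, hj, pv_filterMap_cons]

theorem pv_T4 (t : List Char) :
    (PySem.Chars.splitOn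
        (if 0 ≤ PySem.Chars.find t ['E', 'N', 'D']
         then PySem.Chars.slice t none (some (PySem.Chars.find t ['E', 'N', 'D'])) else t)
        ['\n']).filterMap pvItem
      = pvItems (PySem.Chars.splitOn t ['\n']) := by
  suffices H : ∀ (n : Nat) (t : List Char), t.length ≤ n →
      (PySem.Chars.splitOn
        (if 0 ≤ PySem.Chars.find t ['E', 'N', 'D']
         then PySem.Chars.slice t none (some (PySem.Chars.find t ['E', 'N', 'D'])) else t)
        ['\n']).filterMap pvItem
      = pvItems (PySem.Chars.splitOn t ['\n']) by
    exact H t.length t le_rfl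
  intro n
  induction n with
  | zero =>
    intro t hl
    cases t with
    | nil => exact pv_T4_single [] (by simp)
    | cons x xs => simp at hl
  | succ n ih =>
    intro t hl
    by_cases hnl : '\n' ∈ t
    · obtain ⟨a, b, rfl, hna⟩ := pv_nl_decomp t hnl
      have hlb : b.length ≤ n := by
        simp only [List.length_append, List.length_cons] at hl; omega
      rw [pv_find_local _ (by decide) (by decide) a b, pv_lines_append a b hna]
      by_cases hfa : 0 ≤ PySem.Chars.find a ['E', 'N', 'D']
      · rw [if_pos hfa, if_pos hfa]
        have hk : (PySem.Chars.find a ['E', 'N', 'D']).toNat ≤ a.length := by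
          have := PySem.Chars.find_le_length a ['E', 'N', 'D']; omega
        have hsl : PySem.Chars.slice (a ++ '\n' :: b) none (some (PySem.Chars.find a ['E', 'N', 'D']))
            = a.take (PySem.Chars.find a ['E', 'N', 'D']).toNat := by
          rw [PySem.Chars.slice_eq_listSlice, PySem.List.slice_to _ hfa,
            List.take_append_of_le_length hk]
        rw [hsl, pv_lines_single _ (fun hm => hna (List.mem_of_mem_take hm))]
        have hsl2 : PySem.List.slice a none (some (PySem.Chars.find a ['E', 'N', 'D']))
            = a.take (PySem.Chars.find a ['E', 'N', 'D']).toNat := PySem.List.slice_to _ hfa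
        simp [pvItems, hfa, hsl2, pv_filterMap_cons]
      · rw [if_neg hfa]
        have hfa' : PySem.Chars.find a ['E', 'N', 'D'] = -1 := by
          have := PySem.Chars.neg_one_le_find a ['E', 'N', 'D']; omega
        by_cases hfb : 0 ≤ PySem.Chars.find b ['E', 'N', 'D']
        · rw [if_pos hfb,
            if_pos (show (0 : Int) ≤ (a.length : Int) + 1 + PySem.Chars.find b ['E', 'N', 'D'] by omega)]
          have hib := ih b hlb
          rw [if_pos hfb] at hib
          have hslb : PySem.Chars.slice b none (some (PySem.Chars.find b ['E', 'N', 'D']))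
              = b.take (PySem.Chars.find b ['E', 'N', 'D']).toNat := by
            rw [PySem.Chars.slice_eq_listSlice, PySem.List.slice_to _ hfb]
          rw [hslb] at hib
          have hsl : PySem.Chars.slice (a ++ '\n' :: b) none
              (some ((a.length : Int) + 1 + PySem.Chars.find b ['E', 'N', 'D']))
              = a ++ '\n' :: b.take (PySem.Chars.find b ['E', 'N', 'D']).toNat := by
            rw [PySem.Chars.slice_eq_listSlice, PySem.List.slice_to _ (by omega)]
            have htn : ((a.length : Int) + 1 + PySem.Chars.find b ['E', 'N', 'D']).toNat
                = a.length + (1 + (PySem.Chars.find b ['E', 'N', 'D']).toNat) := by omega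
            rw [htn, List.take_append, List.take_of_length_le (by omega)]
            congr 1
            rw [show a.length + (1 + (PySem.Chars.find b ['E', 'N', 'D']).toNat) - a.length
                  = (PySem.Chars.find b ['E', 'N', 'D']).toNat + 1 from by omega,
              List.take_succ_cons]
          rw [hsl, pv_lines_append _ _ hna, pv_filterMap_cons, hib]
          simp [pvItems, hfa']
        · rw [if_neg hfb, if_neg (show ¬ (0 : Int) ≤ -1 by omega)]
          have hib := ih b hlb
          rw [if_neg hfb] at hib
          rw [pv_lines_append a b hna, pv_filterMap_cons, hib]
          simp [pvItems, hfa']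
    · exact pv_T4_single t hnl

-- ---- the header search of A equals the seek of B's machine ----

theorem pv_Z (r : List Char)
    (h : PySem.Chars.find r ['I', 'n', 'g', 'r', 'e', 'd', 'i', 'e', 'n', 't', 's', ':'] = -1) :
    pvSeek (PySem.Chars.splitOn r ['\n']) = [] := by
  have H : ∀ (n : Nat) (r : List Char), r.length ≤ n →
      PySem.Chars.find r ['I', 'n', 'g', 'r', 'e', 'd', 'i', 'e', 'n', 't', 's', ':'] = -1 →
      pvSeek (PySem.Chars.splitOn r ['\n']) = [] := by
    intro n
    induction n with
    | zero =>
      intro r hl h0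
      cases r with
      | nil =>
        rw [pv_splitOn_nil]
        simp [pvSeek, pv_find_nil ['I', 'n', 'g', 'r', 'e', 'd', 'i', 'e', 'n', 't', 's', ':'] (by decide)]
      | cons x xs => simp at hl
    | succ n ih =>
      intro r hl h0
      by_cases hnl : '\n' ∈ r
      · obtain ⟨a, b, rfl, hna⟩ := pv_nl_decomp r hnl
        have hloc := pv_find_local ['I', 'n', 'g', 'r', 'e', 'd', 'i', 'e', 'n', 't', 's', ':'] (by decide) (by decide) a b
        have hfa : ¬ 0 ≤ PySem.Chars.find a ['I', 'n', 'g', 'r', 'e', 'd', 'i', 'e', 'n', 't', 's', ':'] := by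
          intro hx; rw [hloc, if_pos hx] at h0; omega
        have hfb : PySem.Chars.find b ['I', 'n', 'g', 'r', 'e', 'd', 'i', 'e', 'n', 't', 's', ':'] = -1 := by
          by_contra hx
          have hge : 0 ≤ PySem.Chars.find b ['I', 'n', 'g', 'r', 'e', 'd', 'i', 'e', 'n', 't', 's', ':'] := by
            have := PySem.Chars.neg_one_le_find b ['I', 'n', 'g', 'r', 'e', 'd', 'i', 'e', 'n', 't', 's', ':']; omega
          rw [hloc, if_neg hfa, if_pos hge] at h0; omega
        rw [pv_lines_append a b hna]
        simp only [pvSeek]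
        rw [if_pos (show PySem.Chars.find a ['I', 'n', 'g', 'r', 'e', 'd', 'i', 'e', 'n', 't', 's', ':'] < 0 by omega)]
        exact ih b (by simp only [List.length_append, List.length_cons] at hl; omega) hfb
      · rw [pv_lines_single r hnl]
        simp [pvSeek, h0]
  exact H r.length r le_rfl h

theorem pv_T2' (r : List Char)
    (hn : 0 ≤ PySem.Chars.find r ['I', 'n', 'g', 'r', 'e', 'd', 'i', 'e', 'n', 't', 's', ':'])
    (hrest : ¬ ['I', 'n', 'g', 'r', 'e', 'd', 'i', 'e', 'n', 't', 's', ':'] <:+: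
      r.drop ((PySem.Chars.find r ['I', 'n', 'g', 'r', 'e', 'd', 'i', 'e', 'n', 't', 's', ':']).toNat + 12)) :
    pvSeek (PySem.Chars.splitOn r ['\n'])
      = pvItems (PySem.Chars.splitOn
          (r.drop ((PySem.Chars.find r ['I', 'n', 'g', 'r', 'e', 'd', 'i', 'e', 'n', 't', 's', ':']).toNat + 12))
          ['\n']) := by
  have H : ∀ (n : Nat) (r : List Char), r.length ≤ n →
      0 ≤ PySem.Chars.find r ['I', 'n', 'g', 'r', 'e', 'd', 'i', 'e', 'n', 't', 's', ':'] →
      ¬ ['I', 'n', 'g', 'r', 'e', 'd', 'i', 'e', 'n', 't', 's', ':'] <:+: r.drop ((PySem.Chars.find r ['I', 'n', 'g', 'r', 'e', 'd', 'i', 'e', 'n', 't', 's', ':']).toNat + 12) →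
      pvSeek (PySem.Chars.splitOn r ['\n'])
        = pvItems (PySem.Chars.splitOn
            (r.drop ((PySem.Chars.find r ['I', 'n', 'g', 'r', 'e', 'd', 'i', 'e', 'n', 't', 's', ':']).toNat + 12)) ['\n']) := by
    intro n
    induction n with
    | zero =>
      intro r hl hn0 _
      cases r with
      | nil => rw [pv_find_nil _ (by decide)] at hn0; omega
      | cons x xs => simp at hl
    | succ n ih =>
      intro r hl hn0 hr0
      by_cases hnl : '\n' ∈ r
      · obtain ⟨a, b, rfl, hna⟩ := pv_nl_decomp r hnl
        have hloc := pv_find_local ['I', 'n', 'g', 'r', 'e', 'd', 'i', 'e', 'n', 't', 's', ':'] (by decide) (by decide) a b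
        rw [pv_lines_append a b hna]
        by_cases hfa : 0 ≤ PySem.Chars.find a ['I', 'n', 'g', 'r', 'e', 'd', 'i', 'e', 'n', 't', 's', ':']
        · rw [hloc, if_pos hfa]
          simp only [pvSeek]
          rw [if_neg (show ¬ PySem.Chars.find a ['I', 'n', 'g', 'r', 'e', 'd', 'i', 'e', 'n', 't', 's', ':'] < 0 by omega)]
          have h12 : (PySem.Chars.find a ['I', 'n', 'g', 'r', 'e', 'd', 'i', 'e', 'n', 't', 's', ':']).toNat + 12 ≤ a.length := by
            have hsp := (PySem.Chars.find_spec (s := a)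
              (sub := ['I', 'n', 'g', 'r', 'e', 'd', 'i', 'e', 'n', 't', 's', ':']) hfa).1
            have := hsp.length_le
            simp only [List.length_drop] at this
            have h0 : (['I', 'n', 'g', 'r', 'e', 'd', 'i', 'e', 'n', 't', 's', ':'] : List Char).length = 12 := rfl
            rw [h0] at this
            omega
          rw [List.drop_append_of_le_length h12,
            pv_lines_append _ b (fun hm => hna (List.mem_of_mem_drop hm))]
          have hdr : PySem.Chars.slice a (some (PySem.Chars.find a ['I', 'n', 'g', 'r', 'e', 'd', 'i', 'e', 'n', 't', 's', ':'] + 12)) none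
              = a.drop ((PySem.Chars.find a ['I', 'n', 'g', 'r', 'e', 'd', 'i', 'e', 'n', 't', 's', ':']).toNat + 12) := by
            rw [PySem.Chars.slice_eq_listSlice, PySem.List.slice_from _ (by omega)]
            congr 1
            omega
          rw [hdr]
        · have hm : 0 ≤ PySem.Chars.find b ['I', 'n', 'g', 'r', 'e', 'd', 'i', 'e', 'n', 't', 's', ':'] := by
            by_contra hx
            rw [hloc, if_neg hfa, if_neg hx] at hn0; omega
          have hdrop : ∀ (x : List Char), x = a ++ '\n' :: b →
              x.drop (((a.length : Int) + 1 + PySem.Chars.find b ['I', 'n', 'g', 'r', 'e', 'd', 'i', 'e', 'n', 't', 's', ':']).toNat + 12)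
              = b.drop ((PySem.Chars.find b ['I', 'n', 'g', 'r', 'e', 'd', 'i', 'e', 'n', 't', 's', ':']).toNat + 12) := by
            intro x hx
            subst hx
            rw [show (((a.length : Int) + 1 + PySem.Chars.find b ['I', 'n', 'g', 'r', 'e', 'd', 'i', 'e', 'n', 't', 's', ':']).toNat + 12)
                  = a.length + (((PySem.Chars.find b ['I', 'n', 'g', 'r', 'e', 'd', 'i', 'e', 'n', 't', 's', ':']).toNat + 12) + 1) from by omega,
              ← List.drop_drop, List.drop_left,
              show ((PySem.Chars.find b ['I', 'n', 'g', 'r', 'e', 'd', 'i', 'e', 'n', 't', 's', ':']).toNat + 12) + 1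
                  = 1 + ((PySem.Chars.find b ['I', 'n', 'g', 'r', 'e', 'd', 'i', 'e', 'n', 't', 's', ':']).toNat + 12) from by omega,
              ← List.drop_drop]
            rfl
          rw [hloc, if_neg hfa, if_pos hm] at hr0 ⊢
          rw [hdrop _ rfl] at hr0 ⊢
          simp only [pvSeek]
          rw [if_pos (show PySem.Chars.find a ['I', 'n', 'g', 'r', 'e', 'd', 'i', 'e', 'n', 't', 's', ':'] < 0 by omega)]
          exact ih b (by simp only [List.length_append, List.length_cons] at hl; omega) hm hr0
      · rw [pv_lines_single r hnl]
        simp only [pvSeek]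
        rw [if_neg (show ¬ PySem.Chars.find r ['I', 'n', 'g', 'r', 'e', 'd', 'i', 'e', 'n', 't', 's', ':'] < 0 by omega)]
        have hdr : PySem.Chars.slice r (some (PySem.Chars.find r ['I', 'n', 'g', 'r', 'e', 'd', 'i', 'e', 'n', 't', 's', ':'] + 12)) none
            = r.drop ((PySem.Chars.find r ['I', 'n', 'g', 'r', 'e', 'd', 'i', 'e', 'n', 't', 's', ':']).toNat + 12) := by
          rw [PySem.Chars.slice_eq_listSlice, PySem.List.slice_from _ (by omega)]
          congr 1
          omega
        rw [hdr, pv_lines_single _ (fun hm => hnl (List.mem_of_mem_drop hm))]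
  exact H r.length r le_rfl hn hrest

theorem pv_splitOn_short (sep l : List Char) (hsep : sep ≠ [])
    (h : (PySem.Chars.splitOn l sep).length ≤ 1) : PySem.Chars.find l sep = -1 := by
  by_contra hx
  rw [pv_splitOn_eq_find sep hsep l, if_neg hx] at h
  simp only [List.length_cons] at h
  have hpos := List.length_pos_of_ne_nil
    (pv_splitOn_ne_nil sep hsep (l.drop ((PySem.Chars.find l sep).toNat + sep.length)))
  omega

theorem pv_parts (r : List Char)
    (hn : 0 ≤ PySem.Chars.find r ['I', 'n', 'g', 'r', 'e', 'd', 'i', 'e', 'n', 't', 's', ':'])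
    (hc : (PySem.Chars.splitOn r ['I', 'n', 'g', 'r', 'e', 'd', 'i', 'e', 'n', 't', 's', ':']).length ≤ 2) :
    PySem.Chars.splitOn r ['I', 'n', 'g', 'r', 'e', 'd', 'i', 'e', 'n', 't', 's', ':']
      = [r.take (PySem.Chars.find r ['I', 'n', 'g', 'r', 'e', 'd', 'i', 'e', 'n', 't', 's', ':']).toNat,
         r.drop ((PySem.Chars.find r ['I', 'n', 'g', 'r', 'e', 'd', 'i', 'e', 'n', 't', 's', ':']).toNat + 12)]
    ∧ ¬ ['I', 'n', 'g', 'r', 'e', 'd', 'i', 'e', 'n', 't', 's', ':'] <:+: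
        r.drop ((PySem.Chars.find r ['I', 'n', 'g', 'r', 'e', 'd', 'i', 'e', 'n', 't', 's', ':']).toNat + 12) := by
  have hH : (['I', 'n', 'g', 'r', 'e', 'd', 'i', 'e', 'n', 't', 's', ':'] : List Char) ≠ [] := by decide
  have hne : ¬ PySem.Chars.find r ['I', 'n', 'g', 'r', 'e', 'd', 'i', 'e', 'n', 't', 's', ':'] = -1 := by omega
  have hlen : (['I', 'n', 'g', 'r', 'e', 'd', 'i', 'e', 'n', 't', 's', ':'] : List Char).length = 12 := rfl
  rw [pv_splitOn_eq_find _ hH r, if_neg hne, hlen] at hc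
  simp only [List.length_cons] at hc
  have hr1 : (PySem.Chars.splitOn
      (r.drop ((PySem.Chars.find r ['I', 'n', 'g', 'r', 'e', 'd', 'i', 'e', 'n', 't', 's', ':']).toNat + 12)) ['I', 'n', 'g', 'r', 'e', 'd', 'i', 'e', 'n', 't', 's', ':']).length ≤ 1 := by
    omega
  have hfr : PySem.Chars.find
      (r.drop ((PySem.Chars.find r ['I', 'n', 'g', 'r', 'e', 'd', 'i', 'e', 'n', 't', 's', ':']).toNat + 12)) ['I', 'n', 'g', 'r', 'e', 'd', 'i', 'e', 'n', 't', 's', ':'] = -1 :=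
    pv_splitOn_short _ _ hH hr1
  constructor
  · rw [pv_splitOn_eq_find _ hH r, if_neg hne, hlen,
      pv_splitOn_eq_find _ hH _, if_pos hfr]
  · exact (PySem.Chars.find_eq_neg_one_iff _ _).mp hfr

theorem pv_T2 (r : List Char)
    (hc : (PySem.Chars.splitOn r ['I', 'n', 'g', 'r', 'e', 'd', 'i', 'e', 'n', 't', 's', ':']).length ≤ 2) :
    pvExtractACore r = pvSeek (PySem.Chars.splitOn r ['\n']) := by
  have hH : (['I', 'n', 'g', 'r', 'e', 'd', 'i', 'e', 'n', 't', 's', ':'] : List Char) ≠ [] := by decide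
  unfold pvExtractACore
  simp only [show "Ingredients:".toList = ['I', 'n', 'g', 'r', 'e', 'd', 'i', 'e', 'n', 't', 's', ':'] from rfl,
    show "END".toList = ['E', 'N', 'D'] from rfl,
    show "\n".toList = ['\n'] from rfl,
    show "* ".toList = ['*', ' '] from rfl]
  by_cases hneg : PySem.Chars.find r ['I', 'n', 'g', 'r', 'e', 'd', 'i', 'e', 'n', 't', 's', ':'] = -1
  · rw [if_pos (show (!PySem.Chars.isIn ['I', 'n', 'g', 'r', 'e', 'd', 'i', 'e', 'n', 't', 's', ':'] r) = true by
      simp [PySem.Chars.isIn, hneg])]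
    rw [pv_Z r hneg]
  · have hge : 0 ≤ PySem.Chars.find r ['I', 'n', 'g', 'r', 'e', 'd', 'i', 'e', 'n', 't', 's', ':'] := by
      have := PySem.Chars.neg_one_le_find r ['I', 'n', 'g', 'r', 'e', 'd', 'i', 'e', 'n', 't', 's', ':']; omega
    rw [if_neg (show ¬ (!PySem.Chars.isIn ['I', 'n', 'g', 'r', 'e', 'd', 'i', 'e', 'n', 't', 's', ':'] r) = true by
      simp [PySem.Chars.isIn, hneg])]
    obtain ⟨hparts, hinf⟩ := pv_parts r hge hc
    rw [hparts]
    rw [if_neg (by simp)]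
    have hget1 : ∀ (x y : List Char), (PySem.List.pyGet? [x, y] 1).getD [] = y := by
      intro x y
      rw [show (1 : Int) = ((1 : Nat) : Int) from rfl, PySem.List.pyGet?_natCast]
      simp
    rw [hget1]
    rw [pv_end_cut]
    rw [pv_lines_eq _ [], List.nil_append, pv_filter_strip, pv_T4]
    exact (pv_T2' r hge hinf).symm

-- ---- B's dict machine folds the item lists ----

theorem pv_item_fold (l : List Char) (d : PySem.Dict String Int) :
    (pvItem l).toList.foldl (fun d ing => d.modify ing 0 (· + 1)) d
      = (if PySem.Chars.startswith (PySem.Chars.strip l) ['*', ' '] then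
          (let item := PySem.Chars.lower (PySem.Chars.strip (PySem.Chars.slice (PySem.Chars.strip l) (some 2) none))
           if item ≠ [] then d.modify (String.ofList item) 0 (· + 1) else d)
        else d) := by
  by_cases h1 : PySem.Chars.startswith (PySem.Chars.strip l) ['*', ' ']
  · by_cases h2 : PySem.Chars.lower (PySem.Chars.strip (PySem.List.slice (PySem.Chars.strip l) (some 2) none)) = []
    · simp [pvItem, h1, h2]
    · simp [pvItem, h1, h2]
  · simp [pvItem, h1]

theorem pv_step (line1 : List Char) (rest : List (List Char)) (d : PySem.Dict String Int)
    (hrest : ∀ d' : PySem.Dict String Int,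
      pvScanB rest true d' = (pvItems rest).foldl (fun d ing => d.modify ing 0 (· + 1)) d') :
    (let j := PySem.Chars.find line1 "END".toList
     let line2 := if 0 ≤ j then PySem.Chars.slice line1 none (some j) else line1
     let l := PySem.Chars.strip line2
     let d' := if PySem.Chars.startswith l "* ".toList then
         (let item := PySem.Chars.lower (PySem.Chars.strip (PySem.Chars.slice l (some 2) none))
          if item ≠ [] then d.modify (String.ofList item) 0 (· + 1) else d)
       else d
     if 0 ≤ j then d' else pvScanB rest true d')
    = (pvItems (line1 :: rest)).foldl (fun d ing => d.modify ing 0 (· + 1)) d := by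
  simp only [show "END".toList = ['E', 'N', 'D'] from rfl,
    show "* ".toList = ['*', ' '] from rfl]
  by_cases hj : 0 ≤ PySem.Chars.find line1 ['E', 'N', 'D']
  · simp only [pvItems, hj, if_true]
    exact (pv_item_fold _ _).symm
  · simp only [pvItems, hj, if_false]
    rw [List.foldl_append, pv_item_fold, hrest]

theorem pv_scanB_items (lines : List (List Char)) (d : PySem.Dict String Int) :
    pvScanB lines true d = (pvItems lines).foldl (fun d ing => d.modify ing 0 (· + 1)) d := by
  induction lines generalizing d with
  | nil => rfl
  | cons line rest ih =>
    simp only [pvScanB, Bool.not_true, Bool.false_eq_true, false_and, if_false]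
    exact pv_step line rest d ih

theorem pv_scanB_seek (lines : List (List Char)) (d : PySem.Dict String Int) :
    pvScanB lines false d = (pvSeek lines).foldl (fun d ing => d.modify ing 0 (· + 1)) d := by
  induction lines generalizing d with
  | nil => rfl
  | cons line rest ih =>
    by_cases hi : PySem.Chars.find line ['I', 'n', 'g', 'r', 'e', 'd', 'i', 'e', 'n', 't', 's', ':'] < 0
    · simp only [pvScanB]
      rw [if_pos ⟨rfl, hi⟩]
      simp only [pvSeek]
      rw [if_pos hi]
      exact ih d
    · simp only [pvScanB]
      rw [if_neg (fun hand => hi hand.2)]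
      simp only [Bool.false_eq_true, if_false]
      rw [pv_step _ rest d (fun d' => pv_scanB_items rest d')]
      simp only [pvSeek, show "Ingredients:".toList = ['I', 'n', 'g', 'r', 'e', 'd', 'i', 'e', 'n', 't', 's', ':'] from rfl]
      rw [if_neg hi,
        show (PySem.Chars.len ['I', 'n', 'g', 'r', 'e', 'd', 'i', 'e', 'n', 't', 's', ':'] : Int) = 12 from by decide]

-- ---- assembly ----

theorem pv_T_content (r : List Char)
    (hc : (PySem.Chars.splitOn r ['I', 'n', 'g', 'r', 'e', 'd', 'i', 'e', 'n', 't', 's', ':']).length ≤ 2)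
    (d : PySem.Dict String Int) :
    pvScanB (PySem.Chars.splitOn r ['\n']) false d
      = (pvExtractACore r).foldl (fun d ing => d.modify ing 0 (· + 1)) d := by
  rw [pv_scanB_seek, pv_T2 r hc]

theorem pv_content_getD (messages : List (List (String × String))) :
    pvContent messages
      = (((messages.getD 1 []).find? (fun p => p.1 == "content")).getD ("", "")).2 := by
  unfold pvContent
  have h1 : ((PySem.List.pyGet? messages 1).getD []) = messages.getD 1 [] := by
    rw [show (1 : Int) = ((1 : Nat) : Int) from rfl, PySem.List.pyGet?_natCast,
      List.getD_eq_getElem?_getD]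
  rw [h1]
  cases (messages.getD 1 []).find? (fun p => p.1 == "content") with
  | none => simp
  | some p => simp

theorem pv_agg (ml : List (List (List (String × String))))
    (h : Pre_get_ingredient_frequencies ml) (d : PySem.Dict String Int) :
    ml.foldl (fun d messages =>
      if 2 ≤ messages.length then
        (pvExtractA (pvContent messages)).foldl (fun d ing => d.modify ing 0 (· + 1)) d
      else d) d
  = ml.foldl (fun d messages =>
      if 2 ≤ messages.length then
        pvScanB (PySem.Chars.splitOn (pvContent messages).toList "\n".toList) false d
      else d) d := by
  induction ml generalizing d with
  | nil => rfl
  | cons m t ih =>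
    have ht : Pre_get_ingredient_frequencies t := fun x hx => h x (List.mem_cons_of_mem m hx)
    simp only [List.foldl_cons]
    by_cases h2 : 2 ≤ m.length
    · rw [if_pos h2, if_pos h2]
      have hc := (h m List.mem_cons_self h2).2
      rw [← pv_content_getD m] at hc
      have hstep : (pvExtractA (pvContent m)).foldl (fun d ing => d.modify ing 0 (· + 1)) d
          = pvScanB (PySem.Chars.splitOn (pvContent m).toList "\n".toList) false d :=
        (pv_T_content (pvContent m).toList hc d).symm
      rw [hstep]
      exact ih ht _
    · rw [if_neg h2, if_neg h2]
      exact ih ht _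

-- ===== VERDICT (by name: the statement is the Claim_ definition above) =====
theorem get_ingredient_frequencies_spec : Claim_equal_get_ingredient_frequencies := by
  intro ml _ hpre
  unfold Spec_get_ingredient_frequencies
  unfold get_ingredient_frequencies get_ingredient_frequencies_alt
  exact congrArg PySem.Dict.items (pv_agg ml hpre PySem.Dict.empty)
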